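-- pv_equiv track=rewrite | github.com/GB071957/Advent-of-Christmas | Advent of Code problem 13 part 2 - Shuttle search.py | poss_first_time
-- ===== SOURCE A (Python) =====
-- def poss_first_time(depart,add_bus,spacing,increment):
--     found_first_time = False
--     while not found_first_time:
--         if (depart + spacing) % add_bus == 0:
--             found_first_time = True
--         else:
--             depart += increment
--     return depart
-- ===== SOURCE B (Python) =====
-- def _egcd(a, b):
--     # iterative extended Euclid: returns (g, s) with g = gcd(a, b) >= 0
--     # (for a, b >= 0) and s*a == g (mod b0) for the original b0.
--     old_r, r = a, b
--     old_s, s = 1, 0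
--     while r != 0:
--         q = old_r // r
--         old_r, r = r, old_r - q * r
--         old_s, s = s, old_s - q * s
--     return old_r, old_s
--
-- def poss_first_time(depart, add_bus, spacing, increment):
--     # Solve the linear congruence k*increment ≡ -(depart+spacing) (mod |add_bus|)
--     # for the least k >= 0, and return depart + k*increment directly.
--     m = abs(add_bus)
--     r = (-(depart + spacing)) % m
--     g, s = _egcd(increment % m, m)
--     mg = m // g
--     k = ((r // g) * s) % mg
--     return depart + k * increment
-- ===== Notes on version B (the rewrite author's own statement) =====
-- stated objective: faster
-- what changed: Replaces A's step-by-increment linear search with a single extended-Euclid solve of the linear congruence k*increment ≡ -(depart+spacing) (mod add_bus), returning depart + k*increment in closed form.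
import Mathlib
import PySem

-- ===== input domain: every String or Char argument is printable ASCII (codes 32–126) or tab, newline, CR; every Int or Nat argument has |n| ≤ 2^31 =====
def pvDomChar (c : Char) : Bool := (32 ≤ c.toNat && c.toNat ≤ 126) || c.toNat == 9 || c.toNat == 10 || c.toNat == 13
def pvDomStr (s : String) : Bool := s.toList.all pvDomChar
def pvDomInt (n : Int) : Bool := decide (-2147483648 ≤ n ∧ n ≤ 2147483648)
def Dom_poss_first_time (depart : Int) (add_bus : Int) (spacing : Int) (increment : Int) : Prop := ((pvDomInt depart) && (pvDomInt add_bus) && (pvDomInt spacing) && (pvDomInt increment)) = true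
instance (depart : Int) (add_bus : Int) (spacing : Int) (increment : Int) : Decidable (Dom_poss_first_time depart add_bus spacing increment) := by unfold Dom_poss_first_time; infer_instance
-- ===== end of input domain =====

-- B replaces A's linear step-by-increment search with one extended-Euclid solve of the
-- linear congruence, returning the answer in closed form (objective: faster).

-- ===== PORT A =====
-- A's while loop; the fuel argument only makes it total (under Pre_ and Dom_ the loop
-- exits within the fuel given below).
def pftLoop : Nat → Int → Int → Int → Int → Int
  | 0, depart, _, _, _ => depart
  | fuel+1, depart, add_bus, spacing, increment =>
    if PySem.Int.mod (depart + spacing) add_bus = 0 then depart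
    else pftLoop fuel (depart + increment) add_bus spacing increment

def poss_first_time (depart : Int) (add_bus : Int) (spacing : Int) (increment : Int) : Int :=
  pftLoop (2 ^ 32) depart add_bus spacing increment

-- ===== PORT B =====
-- Source B's _egcd while loop (r strictly shrinks in absolute value, so it terminates).
def egcdLoop (old_r r old_s s : Int) : Int × Int :=
  if h : r = 0 then (old_r, old_s)
  else
    egcdLoop r (old_r - PySem.Int.floordiv old_r r * r) s (old_s - PySem.Int.floordiv old_r r * s)
termination_by r.natAbs
decreasing_by
  have hmr : old_r - PySem.Int.floordiv old_r r * r = PySem.Int.mod old_r r := by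
    have := PySem.Int.floordiv_mul_add_mod old_r r
    omega
  rw [hmr]
  rcases lt_or_gt_of_ne h with hneg | hpos
  · have h1 := (PySem.Int.mod_neg_bounds (a := old_r) hneg).1
    have h2 := (PySem.Int.mod_neg_bounds (a := old_r) hneg).2
    omega
  · have h1 := PySem.Int.mod_nonneg (a := old_r) hpos
    have h2 := PySem.Int.mod_lt (a := old_r) hpos
    omega

def poss_first_time_alt (depart : Int) (add_bus : Int) (spacing : Int) (increment : Int) : Int :=
  let m := |add_bus|
  let r := PySem.Int.mod (-(depart + spacing)) m
  let gs := egcdLoop (PySem.Int.mod increment m) m 1 0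
  let mg := PySem.Int.floordiv m gs.1
  let k := PySem.Int.mod (PySem.Int.floordiv r gs.1 * gs.2) mg
  depart + k * increment

-- ===== PRECONDITION & SPEC =====
-- Pre_ excludes add_bus = 0 (Python raises ZeroDivisionError) and the inputs where
-- gcd(increment, add_bus) does not divide depart + spacing (A's while loop never returns).
def Pre_poss_first_time (depart : Int) (add_bus : Int) (spacing : Int) (increment : Int) : Prop :=
  add_bus ≠ 0 ∧ ((Int.gcd increment add_bus : Int) ∣ (depart + spacing))
instance (depart : Int) (add_bus : Int) (spacing : Int) (increment : Int) : Decidable (Pre_poss_first_time depart add_bus spacing increment) := by unfold Pre_poss_first_time; infer_instance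

def pvWitness_poss_first_time : Int × Int × Int × Int := (0, 7, 3, 2)

def Spec_poss_first_time (depart : Int) (add_bus : Int) (spacing : Int) (increment : Int) (out : Int) : Prop := out = poss_first_time_alt depart add_bus spacing increment
instance (depart : Int) (add_bus : Int) (spacing : Int) (increment : Int) (out : Int) : Decidable (Spec_poss_first_time depart add_bus spacing increment out) := by unfold Spec_poss_first_time; infer_instance

-- ===== CLAIM (what is proved, stated in full; the proofs are below) =====
def Claim_equal_poss_first_time : Prop := ∀ (depart : Int) (add_bus : Int) (spacing : Int) (increment : Int), Dom_poss_first_time depart add_bus spacing increment → Pre_poss_first_time depart add_bus spacing increment → Spec_poss_first_time depart add_bus spacing increment (poss_first_time depart add_bus spacing increment)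

-- ===== LEMMAS AND PROOFS =====

-- gcd is invariant under subtracting a multiple (the Euclidean step).
lemma gcd_step (a r q : Int) : Int.gcd r (a - q * r) = Int.gcd a r := by
  apply Nat.dvd_antisymm
  · have h1 : (↑(Int.gcd r (a - q * r)) : Int) ∣ r := Int.gcd_dvd_left r (a - q * r)
    have h2 : (↑(Int.gcd r (a - q * r)) : Int) ∣ a - q * r := Int.gcd_dvd_right r (a - q * r)
    have h3 : (↑(Int.gcd r (a - q * r)) : Int) ∣ a := by
      have := dvd_add h2 (h1.mul_left q)
      simpa using this
    exact Int.dvd_gcd h3 h1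
  · have h1 : (↑(Int.gcd a r) : Int) ∣ a := Int.gcd_dvd_left a r
    have h2 : (↑(Int.gcd a r) : Int) ∣ r := Int.gcd_dvd_right a r
    exact Int.dvd_gcd h2 (dvd_sub h1 (h2.mul_left q))

-- Invariant of Source B's _egcd loop: the first result is gcd of the pair, and modulo b0
-- the results keep satisfying  value ≡ coeff * a0.
lemma egcdLoop_spec (a0 b0 : Int) :
    ∀ (old_r r old_s s : Int), 0 ≤ old_r → 0 ≤ r →
    old_r ≡ old_s * a0 [ZMOD b0] → r ≡ s * a0 [ZMOD b0] →
    (egcdLoop old_r r old_s s).1 = (Int.gcd old_r r : Int) ∧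
    (egcdLoop old_r r old_s s).1 ≡ (egcdLoop old_r r old_s s).2 * a0 [ZMOD b0] := by
  intro old_r r old_s s
  induction old_r, r, old_s, s using egcdLoop.induct with
  | case1 old_r old_s s =>
    intro h1 _ hc1 _
    rw [egcdLoop]
    refine ⟨?_, hc1⟩
    simp [Int.gcd, Int.natAbs_of_nonneg h1]
  | case2 old_r r old_s s h ih =>
    intro h1 h2 hc1 hc2
    have hpos : 0 < r := lt_of_le_of_ne h2 (Ne.symm h)
    have hfd : PySem.Int.floordiv old_r r = old_r / r := PySem.Int.floordiv_eq_ediv_of_pos hpos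
    have hmr : old_r - PySem.Int.floordiv old_r r * r = old_r % r := by
      rw [hfd, Int.emod_def]; ring
    rw [egcdLoop]
    simp only [dif_neg h]
    have hr2 : (0:Int) ≤ old_r - PySem.Int.floordiv old_r r * r := by
      rw [hmr]; exact Int.emod_nonneg old_r (ne_of_gt hpos)
    have hcnew : old_r - PySem.Int.floordiv old_r r * r ≡
        (old_s - PySem.Int.floordiv old_r r * s) * a0 [ZMOD b0] := by
      have := Int.ModEq.sub hc1 (Int.ModEq.mul_left (PySem.Int.floordiv old_r r) hc2)
      calc old_r - PySem.Int.floordiv old_r r * r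
          ≡ old_s * a0 - PySem.Int.floordiv old_r r * (s * a0) [ZMOD b0] := this
        _ = (old_s - PySem.Int.floordiv old_r r * s) * a0 := by ring
    obtain ⟨hg, hc⟩ := ih h2 hr2 hc2 hcnew
    refine ⟨?_, hc⟩
    rw [hg]
    congr 1
    exact gcd_step old_r r (PySem.Int.floordiv old_r r)

-- A's loop returns depart + k*increment when k is the first index whose stop test fires.
lemma loop_reach (a sp i : Int) :
    ∀ (k : Nat) (fuel : Nat) (d : Int), k < fuel →
    (a ∣ (d + sp + (k : Int) * i)) →
    (∀ j : Nat, j < k → ¬ a ∣ (d + sp + (j : Int) * i)) →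
    pftLoop fuel d a sp i = d + (k : Int) * i := by
  intro k
  induction k with
  | zero =>
    intro fuel d hf hdvd _
    obtain ⟨fuel, rfl⟩ : ∃ f, fuel = f + 1 := ⟨fuel - 1, by omega⟩
    rw [pftLoop]
    have : PySem.Int.mod (d + sp) a = 0 := by
      rw [PySem.Int.mod_eq_zero_iff_dvd]
      simpa using hdvd
    simp [this]
  | succ k ih =>
    intro fuel d hf hdvd hmin
    obtain ⟨fuel, rfl⟩ : ∃ f, fuel = f + 1 := ⟨fuel - 1, by omega⟩
    rw [pftLoop]
    have hnot : ¬ PySem.Int.mod (d + sp) a = 0 := by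
      rw [PySem.Int.mod_eq_zero_iff_dvd]
      have := hmin 0 (Nat.succ_pos k)
      simpa using this
    rw [if_neg hnot]
    have h1 : pftLoop fuel (d + i) a sp i = (d + i) + (k : Int) * i := by
      apply ih fuel (d + i) (by omega)
      · push_cast at hdvd
        have heq : d + i + sp + (k : Int) * i = d + sp + ((k : Int) + 1) * i := by ring
        rw [heq]; exact hdvd
      · intro j hj
        have hmj := hmin (j + 1) (by omega)
        push_cast at hmj
        intro hcon
        apply hmj
        have heq : d + sp + ((j : Int) + 1) * i = d + i + sp + (j : Int) * i := by ring
        rw [heq]; exact hcon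
    rw [h1]; push_cast; ring

-- ===== VERDICT (by name: the statement is the Claim_ definition above) =====
theorem poss_first_time_spec : Claim_equal_poss_first_time := by
  intro d a sp i hdom hpre
  obtain ⟨ha, hdvd⟩ := hpre
  unfold Spec_poss_first_time poss_first_time poss_first_time_alt
  simp only []
  set m : Int := |a| with hm_def
  have hm : 0 < m := abs_pos.mpr ha
  set a0 : Int := PySem.Int.mod i m with ha0_def
  have ha0 : a0 = i % m := PySem.Int.mod_eq_emod_of_pos hm
  set gs := egcdLoop a0 m 1 0 with hgs_def
  obtain ⟨hg_eq, hg_cong⟩ := egcdLoop_spec a0 m a0 m 1 0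
      (by rw [ha0]; exact Int.emod_nonneg i (ne_of_gt hm)) (le_of_lt hm)
      (by rw [one_mul]) (by simpa using Int.modEq_zero_iff_dvd.mpr (dvd_refl m))
  -- gcd bookkeeping
  have hgcd_a0 : Int.gcd a0 m = Int.gcd i m := by
    rw [ha0]
    have h1 : i % m = i - i / m * m := by rw [Int.emod_def]; ring
    rw [h1, Int.gcd_comm, gcd_step]
  have hgcd_ia : Int.gcd i m = Int.gcd i a := by
    rw [hm_def, Int.gcd_def, Int.gcd_def, Int.natAbs_abs]
  have hg : gs.1 = (Int.gcd i m : Int) := by rw [hg_eq, hgcd_a0]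
  have hgpos : (0:Int) < gs.1 := by
    rw [hg]
    have : 0 < Int.gcd m i := Int.gcd_pos_of_ne_zero_left i (ne_of_gt hm)
    rw [Int.gcd_comm] at this
    exact_mod_cast this
  have hgdvdi : gs.1 ∣ i := by rw [hg]; exact Int.gcd_dvd_left i m
  have hgdvdm : gs.1 ∣ m := by rw [hg]; exact Int.gcd_dvd_right i m
  have hgdvdd : gs.1 ∣ (d + sp) := by rw [hg, hgcd_ia]; exact hdvd
  -- g ≡ σ·i (mod m)
  have hgi : gs.1 ≡ gs.2 * i [ZMOD m] := by
    refine hg_cong.trans (Int.ModEq.mul_left gs.2 ?_)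
    rw [ha0]
    exact Int.emod_emod_of_dvd i dvd_rfl
  -- the residue r
  set rr : Int := PySem.Int.mod (-(d + sp)) m with hrr_def
  have hrr : rr = (-(d + sp)) % m := PySem.Int.mod_eq_emod_of_pos hm
  have hrr_nonneg : 0 ≤ rr := by rw [hrr]; exact Int.emod_nonneg _ (ne_of_gt hm)
  have hrr_lt : rr < m := by rw [hrr]; exact Int.emod_lt_of_pos _ hm
  have hrr_cong : rr ≡ -(d + sp) [ZMOD m] := by
    rw [hrr]; exact Int.emod_emod_of_dvd _ dvd_rfl
  have hgdvdr : gs.1 ∣ rr := by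
    obtain ⟨t, ht⟩ := hrr_cong.dvd
    have h9 : rr = -(d + sp) - m * t := by omega
    rw [h9]
    exact dvd_sub (dvd_neg.mpr hgdvdd) (hgdvdm.mul_right t)
  -- mg
  set mg : Int := PySem.Int.floordiv m gs.1 with hmg_def
  have hmg : mg = m / gs.1 := PySem.Int.floordiv_eq_ediv_of_pos hgpos
  have hmg_mul : mg * gs.1 = m := by rw [hmg]; exact Int.ediv_mul_cancel hgdvdm
  have hmgpos : 0 < mg := by nlinarith [hmg_mul, hm, hgpos]
  -- k
  set x : Int := PySem.Int.floordiv rr gs.1 * gs.2 with hx_def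
  have hxr : PySem.Int.floordiv rr gs.1 * gs.1 = rr := by
    rw [PySem.Int.floordiv_eq_ediv_of_pos hgpos]
    exact Int.ediv_mul_cancel hgdvdr
  set k : Int := PySem.Int.mod x mg with hk_def
  have hk : k = x % mg := PySem.Int.mod_eq_emod_of_pos hmgpos
  have hk_nonneg : 0 ≤ k := by rw [hk]; exact Int.emod_nonneg _ (ne_of_gt hmgpos)
  have hk_lt : k < mg := by rw [hk]; exact Int.emod_lt_of_pos _ hmgpos
  -- C1 : m ∣ (d + sp + k * i)
  have hxi : x * i ≡ rr [ZMOD m] := by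
    have h1 : PySem.Int.floordiv rr gs.1 * gs.1 ≡ PySem.Int.floordiv rr gs.1 * (gs.2 * i) [ZMOD m] :=
      Int.ModEq.mul_left _ hgi
    rw [hxr] at h1
    have h2 : PySem.Int.floordiv rr gs.1 * (gs.2 * i) = x * i := by rw [hx_def]; ring
    rw [h2] at h1
    exact h1.symm
  have hki : k * i ≡ x * i [ZMOD m] := by
    rw [Int.modEq_iff_dvd]
    obtain ⟨i', hi'⟩ := hgdvdi
    have hdk : x - k = mg * (x / mg) := by rw [hk, Int.emod_def]; ring
    have heq : x * i - k * i = m * (x / mg * i') := by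
      rw [← hmg_mul, hi']
      have h10 : x * (gs.1 * i') - k * (gs.1 * i') = (x - k) * (gs.1 * i') := by ring
      rw [h10, hdk]; ring
    rw [heq]
    exact dvd_mul_right m _
  have hC1 : m ∣ (d + sp + k * i) := by
    have h3 : k * i ≡ -(d + sp) [ZMOD m] := (hki.trans hxi).trans hrr_cong
    have h4 := h3.dvd
    have : d + sp + k * i = -((-(d + sp)) - k * i) := by ring
    rw [this]
    exact dvd_neg.mpr h4
  -- C2 : minimality
  have hC2 : ∀ j : Int, 0 ≤ j → j < k → ¬ m ∣ (d + sp + j * i) := by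
    intro j hj0 hjk hcon
    have hdiff : m ∣ (k - j) * i := by
      have h5 := dvd_sub hC1 hcon
      have : d + sp + k * i - (d + sp + j * i) = (k - j) * i := by ring
      rwa [this] at h5
    obtain ⟨i', hi'⟩ := hgdvdi
    have hcop : Int.gcd mg i' = 1 := by
      have hgpos' : 0 < Int.gcd i m := by
        have h11 : (0:Int) < ↑(Int.gcd i m) := hg ▸ hgpos
        exact_mod_cast h11
      have h6 := Int.gcd_div_gcd_div_gcd hgpos'
      have hi'' : i' = i / gs.1 := by
        rw [hi']
        rw [Int.mul_ediv_cancel_left _ (ne_of_gt hgpos)]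
      rw [Int.gcd_comm, hi'', hmg, hg]
      exact h6
    have hmgdvd : mg ∣ (k - j) := by
      have h7 : mg * gs.1 ∣ (k - j) * (gs.1 * i') := by rw [hmg_mul, ← hi']; exact hdiff
      have h8 : mg ∣ i' * (k - j) := by
        rcases h7 with ⟨t, ht⟩
        refine ⟨t, ?_⟩
        have hg0 : gs.1 ≠ 0 := ne_of_gt hgpos
        apply mul_left_cancel₀ hg0
        linear_combination ht
      exact Int.dvd_of_dvd_mul_right_of_gcd_one h8 hcop
    have : mg ≤ k - j := Int.le_of_dvd (by omega) hmgdvd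
    omega
  -- bridge to A's loop
  have hmg_le_m : mg ≤ m := by nlinarith [hmg_mul, hgpos, hmgpos]
  have hm_le : m ≤ 2147483648 := by
    simp only [Dom_poss_first_time, pvDomInt, Bool.and_eq_true, decide_eq_true_eq] at hdom
    rw [hm_def]
    rcases abs_cases a with ⟨h, _⟩ | ⟨h, _⟩ <;> omega
  have hK : ((k.toNat : Int)) = k := Int.toNat_of_nonneg hk_nonneg
  have hloop := loop_reach a sp i k.toNat (2 ^ 32) d
    (by have : (k.toNat : Int) < 2 ^ 32 := by rw [hK]; omega
        exact_mod_cast this)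
    (by rw [hK]
        have := hC1
        rwa [hm_def, abs_dvd] at this)
    (by intro j hj
        have hj' : (j : Int) < k := by
          have : (j : Int) < (k.toNat : Int) := by exact_mod_cast hj
          rwa [hK] at this
        have := hC2 j (Int.natCast_nonneg j) hj'
        rwa [hm_def, abs_dvd] at this)
  rw [hloop, hK]
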